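-- pv_equiv track=rewrite | github.com/daniel-reich/ubiquitous-fiesta | MFteyMABeuGaga3a7_17.py | color_pattern_times
-- ===== SOURCE A (Python) =====
-- def color_pattern_times(cols):
--   if not len(cols): return 0
--   secs = 0
--   color = cols[0]
--   for i in cols:
--     secs += 2
--     if i != color:
--       secs += 1
--     color = i
--   return secs
-- ===== SOURCE B (Python) =====
-- def color_pattern_times(cols):
--   if not cols:
--     return 0
--   def trans(xs):
--     # number of adjacent color changes, by divide and conquer
--     if len(xs) < 2:
--       return 0
--     mid = len(xs) // 2
--     left, right = xs[:mid], xs[mid:]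
--     return trans(left) + trans(right) + (left[-1] != right[0])
--   return 2 * len(cols) + trans(cols)
-- ===== Notes on version B (the rewrite author's own statement) =====
-- stated objective: alternative
-- what changed: B computes the score as 2*len(cols) plus the number of adjacent color changes, where the change count is obtained by a divide-and-conquer recursion that splits the list in half and adds 1 when the halves meet at differing colors, instead of A's single stateful pass carrying a running `color` and interleaving +2/+1 increments.
import Mathlib
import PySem

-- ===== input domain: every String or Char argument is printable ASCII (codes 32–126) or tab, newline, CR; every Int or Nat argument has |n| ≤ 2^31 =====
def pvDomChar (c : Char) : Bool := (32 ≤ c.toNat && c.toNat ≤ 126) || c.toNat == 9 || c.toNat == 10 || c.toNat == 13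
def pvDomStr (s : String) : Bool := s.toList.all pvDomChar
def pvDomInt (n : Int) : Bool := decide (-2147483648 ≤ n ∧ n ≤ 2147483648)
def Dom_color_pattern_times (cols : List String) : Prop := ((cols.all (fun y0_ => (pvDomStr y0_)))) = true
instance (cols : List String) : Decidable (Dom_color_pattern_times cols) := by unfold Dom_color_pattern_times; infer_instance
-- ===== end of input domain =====

-- B computes 2*len(cols) plus the number of adjacent color changes found by a divide-and-conquer
-- split of the list, instead of A's single stateful pass with a running `color` (objective: alternative).

-- ===== PORT A =====
-- A: stateful fold carrying (secs, color), starting color = cols[0].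
def color_pattern_times (cols : List String) : Int :=
  match cols with
  | [] => 0
  | c0 :: _ =>
    (cols.foldl (fun (st : Int × String) i =>
      (st.1 + 2 + (if i ≠ st.2 then 1 else 0), i)) (0, c0)).1

-- ===== PORT B =====
-- B's helper trans: divide and conquer; left[-1] / right[0] are ported via pyGet? (both lists are
-- nonempty when len(xs) ≥ 2, so the options compare exactly as Python's values do).
def pvTransB (xs : List String) : Int :=
  if xs.length < 2 then 0
  else
    let mid := PySem.Int.floordiv (xs.length : Int) 2
    let left := PySem.List.slice xs none (some mid)
    let right := PySem.List.slice xs (some mid) none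
    pvTransB left + pvTransB right +
      (if PySem.List.pyGet? left (-1) ≠ PySem.List.pyGet? right 0 then 1 else 0)
termination_by xs.length
decreasing_by
  all_goals
    have hmid : PySem.Int.floordiv (xs.length : Int) 2 = ((xs.length / 2 : Nat) : Int) := by
      exact_mod_cast PySem.Int.floordiv_natCast xs.length 2
    rw [hmid]
  · rw [PySem.List.slice_to_natCast]; simp; omega
  · rw [PySem.List.slice_from_natCast]; simp; omega

def color_pattern_times_alt (cols : List String) : Int :=
  match cols with
  | [] => 0
  | _ :: _ => 2 * (cols.length : Int) + pvTransB cols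

-- ===== PRECONDITION & SPEC =====
def Spec_color_pattern_times (cols : List String) (out : Int) : Prop := out = color_pattern_times_alt cols
instance (cols : List String) (out : Int) : Decidable (Spec_color_pattern_times cols out) := by unfold Spec_color_pattern_times; infer_instance

-- ===== CLAIM (what is proved, stated in full; the proofs are below) =====
def Claim_equal_color_pattern_times : Prop := ∀ (cols : List String), Dom_color_pattern_times cols → Spec_color_pattern_times cols (color_pattern_times cols)

-- ===== LEMMAS AND PROOFS =====

-- reference count of adjacent changes, by simple structural recursion
def pvAdj : List String → Int
  | [] => 0
  | [_] => 0
  | a :: b :: t => (if a ≠ b then 1 else 0) + pvAdj (b :: t)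

theorem pvAdj_append (l r : List String) (x y : String)
    (hl : l.getLast? = some x) (hr : r.head? = some y) :
    pvAdj (l ++ r) = pvAdj l + pvAdj r + (if x ≠ y then 1 else 0) := by
  induction l with
  | nil => simp at hl
  | cons a t ih =>
    cases t with
    | nil =>
      simp at hl; subst hl
      cases r with
      | nil => simp at hr
      | cons b s => simp at hr; subst hr; simp [pvAdj]; ring
    | cons b u =>
      have hl' : (b :: u).getLast? = some x := by
        simpa [List.getLast?_cons_cons] using hl
      have := ih hl'
      simp only [List.cons_append, pvAdj] at this ⊢
      omega

theorem pvTransB_eq (xs : List String) : pvTransB xs = pvAdj xs := by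
  rw [pvTransB]
  by_cases h : xs.length < 2
  · rw [if_pos h]
    match xs, h with
    | [], _ => rfl
    | [_], _ => rfl
  · rw [if_neg h]
    rw [not_lt] at h
    have hmid : PySem.Int.floordiv (xs.length : Int) 2 = ((xs.length / 2 : Nat) : Int) := by
      exact_mod_cast PySem.Int.floordiv_natCast xs.length 2
    simp only [hmid, PySem.List.slice_to_natCast, PySem.List.slice_from_natCast]
    have h1 : 1 ≤ xs.length / 2 := by omega
    have h2 : xs.length / 2 < xs.length := by omega
    have hlt : (xs.take (xs.length / 2)).length = xs.length / 2 := by simp; omega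
    have hrt : (xs.drop (xs.length / 2)).length = xs.length - xs.length / 2 := by simp
    have ihl := pvTransB_eq (xs.take (xs.length / 2))
    have ihr := pvTransB_eq (xs.drop (xs.length / 2))
    rw [ihl, ihr]
    -- identify the boundary elements
    obtain ⟨x, hx⟩ : ∃ x, (xs.take (xs.length / 2)).getLast? = some x := by
      cases hL : (xs.take (xs.length / 2)).getLast? with
      | none => exfalso; rw [List.getLast?_eq_none_iff] at hL; simp [hL] at hlt; omega
      | some x => exact ⟨x, rfl⟩
    obtain ⟨y, hy⟩ : ∃ y, (xs.drop (xs.length / 2)).head? = some y := by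
      cases hH : (xs.drop (xs.length / 2)).head? with
      | none => exfalso; rw [List.head?_eq_none_iff] at hH; simp [hH] at hrt; omega
      | some y => exact ⟨y, rfl⟩
    have hcat : xs = xs.take (xs.length / 2) ++ xs.drop (xs.length / 2) := (List.take_append_drop _ _).symm
    have hget : PySem.List.pyGet? (xs.take (xs.length / 2)) (-1)
        = (xs.take (xs.length / 2)).getLast? := by
      simp [PySem.List.pyGet?_neg_one]
    have hget0 : PySem.List.pyGet? (xs.drop (xs.length / 2)) 0
        = (xs.drop (xs.length / 2)).head? := by
      rw [PySem.List.pyGet?_zero, List.head?_eq_getElem?]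
    conv_rhs => rw [hcat]
    rw [pvAdj_append _ _ x y hx hy, hget, hget0, hx, hy]
    rcases eq_or_ne x y with hxy | hxy <;> simp [hxy]
termination_by xs.length
decreasing_by
  · simpa [hlt] using h2
  · simp [hrt]; omega

theorem pvA_loop (xs : List String) (s : Int) (c : String) :
    (xs.foldl (fun (st : Int × String) i =>
      (st.1 + 2 + (if i ≠ st.2 then 1 else 0), i)) (s, c)).1
    = s + 2 * (xs.length : Int) + pvAdj xs
      + (match xs with | [] => 0 | x :: _ => if x ≠ c then 1 else 0) := by
  induction xs generalizing s c with
  | nil => simp [pvAdj]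
  | cons x ys ih =>
    simp only [List.foldl_cons, List.length_cons]
    rw [ih]
    cases ys with
    | nil =>
      simp only [pvAdj, List.length_nil]
      split_ifs <;> push_cast <;> ring
    | cons y zs =>
      simp only [pvAdj, List.length_cons]
      split_ifs <;> push_cast <;>
        first
          | ring1
          | (exact absurd (Ne.symm ‹x ≠ y›) ‹¬y ≠ x›)
          | (exact absurd (Ne.symm ‹y ≠ x›) ‹¬x ≠ y›)

-- ===== VERDICT (by name: the statement is the Claim_ definition above) =====
theorem color_pattern_times_spec : Claim_equal_color_pattern_times := by
  intro cols _
  unfold Spec_color_pattern_times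
  cases cols with
  | nil => rfl
  | cons c0 rest =>
    simp only [color_pattern_times, color_pattern_times_alt]
    rw [pvA_loop, pvTransB_eq]
    simp
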